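-- pv_equiv track=rewrite | github.com/ZenoAFfectionate/WhaleCode | code/tools/builtin/web_tool.py | _finalize_rendered_text
-- ===== SOURCE A (Python) =====
-- from typing import Any, Callable, Dict, Iterable, List, Optional, Protocol, Tuple
--
-- def _finalize_rendered_text(text: str) -> str:
--     lines = [line.rstrip() for line in text.splitlines()]
--     cleaned: List[str] = []
--     prev_empty = False
--     for line in lines:
--         if not line.strip():
--             if not prev_empty:
--                 cleaned.append("")
--             prev_empty = True
--             continue
--         cleaned.append(line.strip())
--         prev_empty = False
--     return "\n".join(cleaned).strip()
-- ===== SOURCE B (Python) =====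
-- def _finalize_rendered_text(text: str) -> str:
--     paragraphs = []
--     current = []
--     for line in text.splitlines():
--         s = line.strip()
--         if s:
--             current.append(s)
--         elif current:
--             paragraphs.append("\n".join(current))
--             current = []
--     if current:
--         paragraphs.append("\n".join(current))
--     return "\n\n".join(paragraphs)
-- ===== Notes on version B (the rewrite author's own statement) =====
-- stated objective: alternative
-- what changed: Replaces the prev_empty flag loop that emits collapsed blank separator lines (plus a final outer strip) with a paragraph accumulator: stripped non-blank lines are grouped into paragraphs, each paragraph joined with '\n', and the paragraphs joined with '\n\n', needing no trailing strip.
import Mathlib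
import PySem

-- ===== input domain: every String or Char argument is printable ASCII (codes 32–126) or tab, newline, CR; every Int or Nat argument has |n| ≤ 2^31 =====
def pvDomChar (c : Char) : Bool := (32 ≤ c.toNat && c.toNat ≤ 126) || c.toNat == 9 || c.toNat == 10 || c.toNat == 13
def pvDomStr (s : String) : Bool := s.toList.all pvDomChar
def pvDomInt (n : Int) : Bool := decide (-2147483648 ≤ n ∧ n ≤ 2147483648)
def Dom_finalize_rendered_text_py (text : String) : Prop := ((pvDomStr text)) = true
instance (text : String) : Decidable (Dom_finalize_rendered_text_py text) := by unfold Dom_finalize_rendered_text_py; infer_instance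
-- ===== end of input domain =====

-- B replaces A's prev_empty-flag loop (emit collapsed "" separator lines, join with "\n",
-- final outer strip) by a paragraph accumulator: stripped non-blank lines are grouped into
-- paragraphs, each joined with "\n", the paragraphs joined with "\n\n"; no trailing strip
-- is needed (objective: alternative decomposition, same cost).

-- ===== PORT A =====
/-- loop body of A's `for line in lines` loop (state: cleaned, prev_empty). -/
def stepA (st : List String × Bool) (line : String) : List String × Bool :=
  if PySem.Str.strip line = "" then
    (if st.2 = false then st.1 ++ [""] else st.1, true)
  else
    (st.1 ++ [PySem.Str.strip line], false)

def finalize_rendered_text_py (text : String) : String :=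
  let lines := (PySem.Str.splitlines text).map PySem.Str.rstrip
  let st := lines.foldl stepA (([] : List String), false)
  PySem.Str.strip (PySem.Str.join "\n" st.1)

-- ===== PORT B =====
/-- loop body of B's `for line in text.splitlines()` loop (state: paragraphs, current). -/
def stepB (st : List String × List String) (line : String) : List String × List String :=
  let s := PySem.Str.strip line
  if s ≠ "" then (st.1, st.2 ++ [s])
  else if st.2 ≠ [] then (st.1 ++ [PySem.Str.join "\n" st.2], ([] : List String))
  else st

def finalize_rendered_text_py_alt (text : String) : String :=
  let st := (PySem.Str.splitlines text).foldl stepB (([] : List String), ([] : List String))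
  let paragraphs := if st.2 ≠ [] then st.1 ++ [PySem.Str.join "\n" st.2] else st.1
  PySem.Str.join "\n\n" paragraphs

-- ===== PRECONDITION & SPEC =====
def Spec_finalize_rendered_text_py (text : String) (out : String) : Prop := out = finalize_rendered_text_py_alt text
instance (text : String) (out : String) : Decidable (Spec_finalize_rendered_text_py text out) := by unfold Spec_finalize_rendered_text_py; infer_instance

-- ===== CLAIM (what is proved, stated in full; the proofs are below) =====
def Claim_equal_finalize_rendered_text_py : Prop := ∀ (text : String), Dom_finalize_rendered_text_py text → Spec_finalize_rendered_text_py text (finalize_rendered_text_py text)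

-- ===== LEMMAS AND PROOFS =====

-- proof-side helpers: everything at the List Char level
def pvWS : Char → Bool := PySem.Chars.isspace
def pvB (s : List Char) : Bool := s.isEmpty

/-- front-recursive form of A's cleaned list, over already-stripped lines
(prev = prev_empty flag). -/
def colA : Bool → List (List Char) → List (List Char)
  | _, [] => []
  | prev, s :: ss =>
      if s = [] then (if prev then colA true ss else [] :: colA true ss)
      else s :: colA false ss

/-- front-recursive form of B's final paragraph list (flush included), over
already-stripped lines (cur = current paragraph). -/
def colB (cur : List (List Char)) : List (List Char) → List (List Char)
  | [] => if cur = [] then [] else [PySem.Chars.join ['\n'] cur]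
  | s :: ss =>
      if s ≠ [] then colB (cur ++ [s]) ss
      else if cur ≠ [] then PySem.Chars.join ['\n'] cur :: colB [] ss
      else colB cur ss

/-- B's trailing `if current: paragraphs.append(...)`, as a function of the loop state. -/
def flushStr (st : List String × List String) : List String :=
  if st.2 ≠ [] then st.1 ++ [PySem.Str.join "\n" st.2] else st.1

theorem rdropWhile_cons_neg {α : Type} (p : α → Bool) (a : α) (l : List α) (h : p a = false) :
    List.rdropWhile p (a :: l) = a :: List.rdropWhile p l := by
  simp only [List.rdropWhile, List.reverse_cons, List.dropWhile_append]
  split <;> simp_all [List.dropWhile_cons]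

theorem rdropWhile_cons_pos {α : Type} (p : α → Bool) (a : α) (l : List α) (h : p a = true) :
    List.rdropWhile p (a :: l) =
      if List.rdropWhile p l = [] then [] else a :: List.rdropWhile p l := by
  simp only [List.rdropWhile, List.reverse_cons, List.dropWhile_append]
  split <;> split <;> simp_all
  rename_i hex hall
  obtain ⟨x, hx, hpx⟩ := hex
  exact absurd (hall x hx) (by simp [hpx])

theorem drop_rdrop_comm {α : Type} (p : α → Bool) (l : List α) :
    List.dropWhile p (List.rdropWhile p l) = List.rdropWhile p (List.dropWhile p l) := by
  induction l with
  | nil => simp [List.rdropWhile]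
  | cons a l ih =>
    cases hpa : p a with
    | false =>
      rw [rdropWhile_cons_neg p a l hpa, List.dropWhile_cons_of_neg (by simp [hpa]),
        List.dropWhile_cons_of_neg (by simp [hpa]), rdropWhile_cons_neg p a _ hpa]
    | true =>
      rw [rdropWhile_cons_pos p a l hpa, List.dropWhile_cons_of_pos hpa]
      split
      · rename_i hnil
        rw [List.rdropWhile_eq_nil_iff] at hnil
        have : List.dropWhile p l = [] := by
          rw [List.dropWhile_eq_nil_iff]; intro x hx; exact hnil x hx
        simp [this, ← ih, List.rdropWhile]
      · rw [List.dropWhile_cons_of_pos hpa, ih]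

theorem strip_eq (s : List Char) :
    PySem.Chars.strip s = List.rdropWhile pvWS (List.dropWhile pvWS s) := by
  simp [PySem.Chars.strip, PySem.Chars.lstrip, PySem.Chars.rstrip, List.rdropWhile, pvWS]
theorem rstrip_eq (s : List Char) : PySem.Chars.rstrip s = List.rdropWhile pvWS s := by
  simp [PySem.Chars.rstrip, List.rdropWhile, pvWS]
theorem strip_idem (s : List Char) :
    PySem.Chars.strip (PySem.Chars.strip s) = PySem.Chars.strip s := by
  simp only [strip_eq, drop_rdrop_comm, List.dropWhile_idempotent, List.rdropWhile_idempotent]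

theorem strip_rstrip (s : List Char) :
    PySem.Chars.strip (PySem.Chars.rstrip s) = PySem.Chars.strip s := by
  simp only [strip_eq, rstrip_eq, drop_rdrop_comm, List.rdropWhile_idempotent]

theorem stripped_rstrip (s : List Char) (h : PySem.Chars.strip s = s) :
    List.rdropWhile pvWS s = s := by
  conv_lhs => rw [← h]
  rw [strip_eq, List.rdropWhile_idempotent, ← strip_eq, h]

theorem stripped_head (c : Char) (t : List Char) (h : PySem.Chars.strip (c :: t) = c :: t) :
    pvWS c = false := by
  by_contra hc
  have hc' : pvWS c = true := by simpa using hc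
  rw [strip_eq, List.dropWhile_cons_of_pos hc'] at h
  have h1 : (List.rdropWhile pvWS (List.dropWhile pvWS t)).length ≤ t.length :=
    le_trans (List.rdropWhile_prefix _ _).length_le (List.length_dropWhile_le _ _)
  rw [h] at h1
  simp at h1

theorem ws_nl : pvWS '\n' = true := by decide

theorem join_cons_ne (sep x : List Char) (l : List (List Char)) (h : l ≠ []) :
    PySem.Chars.join sep (x :: l) = x ++ sep ++ PySem.Chars.join sep l := by
  cases l with
  | nil => exact absurd rfl h
  | cons y l => exact PySem.Chars.join_cons_cons sep x y l

theorem join_append (sep : List Char) (xs ys : List (List Char)) (hx : xs ≠ []) (hy : ys ≠ []) :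
    PySem.Chars.join sep (xs ++ ys) = PySem.Chars.join sep xs ++ sep ++ PySem.Chars.join sep ys := by
  induction xs with
  | nil => exact absurd rfl hx
  | cons x xs ih =>
    cases xs with
    | nil => simpa [PySem.Chars.join_singleton] using join_cons_ne sep x ys hy
    | cons x' xs' =>
      rw [List.cons_append, join_cons_ne sep x _ (by simp), join_cons_ne sep x _ (by simp),
        ih (by simp)]
      simp [List.append_assoc]

theorem lstrip_join (L : List (List Char)) (h : ∀ s ∈ L, PySem.Chars.strip s = s) :
    List.dropWhile pvWS (PySem.Chars.join ['\n'] L) =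
      PySem.Chars.join ['\n'] (List.dropWhile pvB L) := by
  induction L with
  | nil => simp [PySem.Chars.join_nil]
  | cons s L ih =>
    by_cases hs : s = []
    · subst hs
      rw [List.dropWhile_cons_of_pos (by simp [pvB])]
      cases L with
      | nil => simp [PySem.Chars.join_singleton, PySem.Chars.join_nil]
      | cons t L' =>
        rw [join_cons_ne _ _ _ (by simp), List.nil_append, ← ih (fun x hx => h x (by simp [hx]))]
        show List.dropWhile pvWS ('\n' :: PySem.Chars.join ['\n'] (t :: L')) = _
        rw [List.dropWhile_cons_of_pos ws_nl]
    · obtain ⟨c, t, rfl⟩ : ∃ c t, s = c :: t := by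
        cases s with | nil => exact absurd rfl hs | cons c t => exact ⟨c, t, rfl⟩
      have hc : pvWS c = false := stripped_head c t (h _ (by simp))
      rw [List.dropWhile_cons_of_neg (by simp [pvB])]
      cases L with
      | nil =>
        simp only [List.dropWhile_nil, PySem.Chars.join_singleton]
        exact List.dropWhile_cons_of_neg (by simp [hc])
      | cons t' L' =>
        rw [join_cons_ne _ _ _ (by simp)]
        show List.dropWhile pvWS (c :: (t ++ ['\n'] ++ PySem.Chars.join ['\n'] (t' :: L'))) = _
        rw [List.dropWhile_cons_of_neg (by simp [hc])]
        simp [List.append_assoc]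

theorem rdrop_append_stripped (Y s : List Char) (hne : s ≠ [])
    (hself : List.rdropWhile pvWS s = s) :
    List.rdropWhile pvWS (Y ++ s) = Y ++ s := by
  rw [List.rdropWhile_eq_self_iff]
  intro hl
  rw [List.getLast_append]
  split
  · rename_i he
    exact absurd (List.isEmpty_iff.mp he) hne
  · simpa using List.rdropWhile_eq_self_iff.mp hself hne

theorem rstrip_join (L : List (List Char)) (h : ∀ s ∈ L, PySem.Chars.strip s = s) :
    List.rdropWhile pvWS (PySem.Chars.join ['\n'] L) =
      PySem.Chars.join ['\n'] (List.rdropWhile pvB L) := by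
  induction L using List.reverseRecOn with
  | nil => simp [PySem.Chars.join_nil, List.rdropWhile]
  | append_singleton L' s ih =>
    by_cases hs : s = []
    · subst hs
      rw [List.rdropWhile_concat_pos pvB L' [] (by simp [pvB])]
      cases L' with
      | nil => simp [PySem.Chars.join_singleton, List.rdropWhile]
      | cons t L'' =>
        rw [join_append _ _ _ (by simp) (by simp), PySem.Chars.join_singleton, List.append_nil,
          List.rdropWhile_concat_pos pvWS _ '\n' ws_nl]
        exact ih (fun x hx => h x (List.mem_append_left _ hx))
    · have hstr : PySem.Chars.strip s = s := h s (by simp)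
      rw [List.rdropWhile_concat_neg pvB L' s (by simp [pvB, hs])]
      cases L' with
      | nil => simpa [PySem.Chars.join_singleton] using stripped_rstrip s hstr
      | cons t L'' =>
        rw [join_append _ _ _ (by simp) (by simp), PySem.Chars.join_singleton]
        exact rdrop_append_stripped _ s hs (stripped_rstrip s hstr)

theorem colA_cons_blank (b : Bool) (ss : List (List Char)) :
    colA b ([] :: ss) = if b then colA true ss else [] :: colA true ss := by
  cases b <;> simp [colA]

theorem colA_cons_ne (b : Bool) (s : List Char) (ss : List (List Char)) (h : s ≠ []) :
    colA b (s :: ss) = s :: colA false ss := by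
  simp [colA, h]

theorem colB_nil_eq (cur : List (List Char)) :
    colB cur [] = if cur = [] then [] else [PySem.Chars.join ['\n'] cur] := rfl

theorem colB_cons_ne (cur : List (List Char)) (s : List Char) (ss : List (List Char)) (h : s ≠ []) :
    colB cur (s :: ss) = colB (cur ++ [s]) ss := by
  simp [colB, h]

theorem colB_cons_blank (cur : List (List Char)) (ss : List (List Char)) :
    colB cur ([] :: ss) =
      if cur = [] then colB [] ss else PySem.Chars.join ['\n'] cur :: colB [] ss := by
  by_cases h : cur = [] <;> simp [colB, h]

theorem colA_stripped (b : Bool) (ss : List (List Char)) (h : ∀ s ∈ ss, PySem.Chars.strip s = s) :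
    ∀ x ∈ colA b ss, PySem.Chars.strip x = x := by
  induction ss generalizing b with
  | nil => simp [colA]
  | cons s ss ih =>
    intro y hy
    by_cases hs : s = []
    · subst hs
      rw [colA_cons_blank] at hy
      cases b with
      | true => exact ih true (fun t ht => h t (by simp [ht])) y (by simpa using hy)
      | false =>
        rcases List.mem_cons.mp (by simpa using hy) with h1 | h1
        · subst h1; rfl
        · exact ih true (fun t ht => h t (by simp [ht])) y h1
    · rw [colA_cons_ne b s ss hs] at hy
      rcases List.mem_cons.mp hy with h1 | h1
      · rw [h1]; exact h s (by simp)
      · exact ih false (fun t ht => h t (by simp [ht])) y h1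

theorem dropWhile_colA (b : Bool) (ss : List (List Char)) :
    List.dropWhile pvB (colA b ss) = colA true ss := by
  induction ss generalizing b with
  | nil => simp [colA]
  | cons s ss ih =>
    by_cases hs : s = []
    · subst hs
      rw [colA_cons_blank, colA_cons_blank, if_pos rfl]
      cases b with
      | true => simpa using ih true
      | false =>
        simp only [Bool.false_eq_true, if_false]
        rw [List.dropWhile_cons_of_pos (by simp [pvB]), ih true]
    · rw [colA_cons_ne b s ss hs, List.dropWhile_cons_of_neg (by simp [pvB, hs]),
        colA_cons_ne true s ss hs]

theorem colA_allblank (ss : List (List Char)) (h : ∀ s ∈ ss, s = []) : colA true ss = [] := by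
  induction ss with
  | nil => rfl
  | cons s ss ih =>
    rw [h s (by simp), colA_cons_blank, if_pos rfl]
    exact ih (fun t ht => h t (by simp [ht]))

theorem mem_colA (b : Bool) (ss : List (List Char)) (s : List Char)
    (hm : s ∈ ss) (hne : s ≠ []) : s ∈ colA b ss := by
  induction ss generalizing b with
  | nil => simp at hm
  | cons t ss ih =>
    rcases List.mem_cons.mp hm with h1 | h1
    · subst h1; rw [colA_cons_ne b s ss hne]; simp
    · by_cases ht : t = []
      · subst ht
        rw [colA_cons_blank]
        cases b with
        | true => simpa using ih true h1
        | false =>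
          simp only [Bool.false_eq_true, if_false]
          exact List.mem_cons_of_mem _ (ih true h1)
      · rw [colA_cons_ne b t ss ht]
        exact List.mem_cons_of_mem _ (ih false h1)

theorem rdrop_colA_nil_iff (ss : List (List Char)) :
    List.rdropWhile pvB (colA true ss) = [] ↔ ∀ s ∈ ss, s = [] := by
  constructor
  · intro h s hs
    by_contra hne
    have hmem := mem_colA true ss s hs hne
    have := (List.rdropWhile_eq_nil_iff.mp h) s hmem
    simp [pvB] at this
    exact hne this
  · intro h
    rw [colA_allblank ss h, List.rdropWhile_nil]

theorem colB_ne_nil (cur : List (List Char)) (ss : List (List Char)) (h : cur ≠ []) :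
    colB cur ss ≠ [] := by
  induction ss generalizing cur with
  | nil => rw [colB_nil_eq, if_neg h]; simp
  | cons s ss ih =>
    by_cases hs : s = []
    · subst hs
      rw [colB_cons_blank, if_neg h]
      simp
    · rw [colB_cons_ne cur s ss hs]
      exact ih (cur ++ [s]) (by simp)

theorem colB_nil_iff (ss : List (List Char)) : colB [] ss = [] ↔ ∀ s ∈ ss, s = [] := by
  induction ss with
  | nil => simp [colB_nil_eq]
  | cons s ss ih =>
    by_cases hs : s = []
    · subst hs
      rw [colB_cons_blank, if_pos rfl]
      simp [ih]
    · rw [colB_cons_ne [] s ss hs]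
      constructor
      · intro h
        exact absurd h (colB_ne_nil [s] ss (by simp))
      · intro h
        exact absurd (h s (by simp)) hs

theorem KK (n : Nat) :
    (∀ ss cur, ss.length ≤ n → cur ≠ [] →
        PySem.Chars.join ['\n', '\n'] (colB cur ss) =
          PySem.Chars.join ['\n'] (cur ++ List.rdropWhile pvB (colA false ss))) ∧
    (∀ ss : List (List Char), ss.length ≤ n →
        PySem.Chars.join ['\n', '\n'] (colB [] ss) =
          PySem.Chars.join ['\n'] (List.rdropWhile pvB (colA true ss))) := by
  induction n with
  | zero =>
    constructor
    · intro ss cur hlen hcur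
      cases ss with
      | nil =>
        rw [colB_nil_eq, if_neg hcur, PySem.Chars.join_singleton]
        simp [colA, List.rdropWhile]
      | cons s rest => simp at hlen
    · intro ss hlen
      cases ss with
      | nil => simp [colB_nil_eq, colA, List.rdropWhile, PySem.Chars.join_nil]
      | cons s rest => simp at hlen
  | succ n ih =>
    obtain ⟨ihK, ihK0⟩ := ih
    have hK : ∀ ss cur, ss.length ≤ n + 1 → cur ≠ [] →
        PySem.Chars.join ['\n', '\n'] (colB cur ss) =
          PySem.Chars.join ['\n'] (cur ++ List.rdropWhile pvB (colA false ss)) := by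
      intro ss cur hlen hcur
      cases ss with
      | nil =>
        rw [colB_nil_eq, if_neg hcur, PySem.Chars.join_singleton]
        simp [colA, List.rdropWhile]
      | cons s rest =>
        have hlen' : rest.length ≤ n := by simpa using hlen
        by_cases hs : s = []
        · subst hs
          rw [colB_cons_blank, if_neg hcur, colA_cons_blank]
          simp only [Bool.false_eq_true, if_false]
          rw [rdropWhile_cons_pos pvB [] _ (by simp [pvB])]
          by_cases hb : List.rdropWhile pvB (colA true rest) = []
          · have hallb : ∀ t ∈ rest, t = [] := (rdrop_colA_nil_iff rest).mp hb
            rw [(colB_nil_iff rest).mpr hallb, if_pos hb]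
            rw [PySem.Chars.join_singleton]
            simp
          · have hbB : colB [] rest ≠ [] := by
              intro hc
              exact hb ((rdrop_colA_nil_iff rest).mpr ((colB_nil_iff rest).mp hc))
            rw [if_neg hb, join_cons_ne _ _ _ hbB, ihK0 rest hlen',
              join_append _ cur _ hcur (by simp),
              join_cons_ne _ _ _ hb]
            simp [List.append_assoc]
        · rw [colB_cons_ne cur s rest hs, colA_cons_ne false s rest hs,
            rdropWhile_cons_neg pvB s _ (by simp [pvB, hs]),
            ihK rest (cur ++ [s]) hlen' (by simp)]
          simp [List.append_assoc]
    refine ⟨hK, ?_⟩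
    intro ss hlen
    cases ss with
    | nil => simp [colB_nil_eq, colA, List.rdropWhile, PySem.Chars.join_nil]
    | cons s rest =>
      have hlen' : rest.length ≤ n := by simpa using hlen
      by_cases hs : s = []
      · subst hs
        rw [colB_cons_blank, if_pos rfl, colA_cons_blank, if_pos rfl]
        exact ihK0 rest hlen'
      · rw [colB_cons_ne [] s rest hs, colA_cons_ne true s rest hs,
          rdropWhile_cons_neg pvB s _ (by simp [pvB, hs])]
        simp only [List.nil_append]
        rw [ihK rest [s] hlen' (by simp)]
        rfl

theorem strip_toList_nil_iff (line : String) :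
    PySem.Str.strip line = "" ↔ PySem.Chars.strip line.toList = [] := by
  constructor
  · intro h
    have := congrArg String.toList h
    simpa [PySem.Str.toList_strip] using this
  · intro h
    have h2 : (PySem.Str.strip line).toList = [] := by
      rw [PySem.Str.toList_strip, h]
    have h3 : PySem.Str.strip line = String.ofList [] := by
      rw [← h2, String.ofList_toList]
    exact h3.trans rfl

theorem stepA_blank (st : List String × Bool) (line : String)
    (h : PySem.Str.strip line = "") :
    stepA st line = (if st.2 = false then st.1 ++ [""] else st.1, true) := by
  simp [stepA, h]

theorem stepA_ne (st : List String × Bool) (line : String)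
    (h : ¬PySem.Str.strip line = "") :
    stepA st line = (st.1 ++ [PySem.Str.strip line], false) := by
  simp [stepA, h]

theorem stepB_ne (st : List String × List String) (line : String)
    (h : ¬PySem.Str.strip line = "") :
    stepB st line = (st.1, st.2 ++ [PySem.Str.strip line]) := by
  simp [stepB, h]

theorem stepB_blank_flush (st : List String × List String) (line : String)
    (h : PySem.Str.strip line = "") (h2 : st.2 ≠ []) :
    stepB st line = (st.1 ++ [PySem.Str.join "\n" st.2], ([] : List String)) := by
  simp [stepB, h, h2]

theorem stepB_blank_skip (st : List String × List String) (line : String)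
    (h : PySem.Str.strip line = "") (h2 : st.2 = []) :
    stepB st line = st := by
  simp [stepB, h, h2]

theorem foldA_bridge (lines : List String) (acc : List String) (prev : Bool) :
    List.map String.toList ((lines.foldl stepA (acc, prev)).1) =
      List.map String.toList acc ++
        colA prev (lines.map (fun l => PySem.Chars.strip l.toList)) := by
  induction lines generalizing acc prev with
  | nil => simp [colA]
  | cons line rest ih =>
    simp only [List.foldl_cons, List.map_cons]
    by_cases hl : PySem.Str.strip line = ""
    · have hl' : PySem.Chars.strip line.toList = [] := (strip_toList_nil_iff line).mp hl
      rw [stepA_blank _ _ hl, hl', colA_cons_blank]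
      cases prev with
      | false =>
        simp only [if_true, Bool.false_eq_true, if_false, reduceIte]
        rw [ih (acc ++ [""]) true]
        simp [List.append_assoc]
      | true =>
        simp only [if_true, Bool.false_eq_true, if_false, reduceIte,
          if_neg (by simp : ¬(true = false))]
        rw [ih acc true]
    · have hl' : PySem.Chars.strip line.toList ≠ [] :=
        fun hc => hl ((strip_toList_nil_iff line).mpr hc)
      rw [stepA_ne _ _ hl, colA_cons_ne prev _ _ hl']
      rw [ih (acc ++ [PySem.Str.strip line]) false]
      simp [List.append_assoc, PySem.Str.toList_strip]

theorem foldB_bridge (lines : List String) (paras cur : List String) :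
    List.map String.toList (flushStr (lines.foldl stepB (paras, cur))) =
      List.map String.toList paras ++
        colB (List.map String.toList cur) (lines.map (fun l => PySem.Chars.strip l.toList)) := by
  induction lines generalizing paras cur with
  | nil =>
    by_cases hc : cur = []
    · subst hc
      simp [flushStr, colB_nil_eq]
    · have hc' : List.map String.toList cur ≠ [] := by simpa using hc
      simp only [List.foldl_nil, List.map_nil, colB_nil_eq, if_neg hc', flushStr]
      rw [if_pos (by simpa using hc : (paras, cur).2 ≠ [])]
      simp [PySem.Str.toList_join]
  | cons line rest ih =>
    simp only [List.foldl_cons, List.map_cons]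
    by_cases hl : PySem.Str.strip line = ""
    · have hl' : PySem.Chars.strip line.toList = [] := (strip_toList_nil_iff line).mp hl
      rw [hl', colB_cons_blank]
      by_cases hc : cur = []
      · subst hc
        rw [stepB_blank_skip _ _ hl rfl]
        simp only [List.map_nil, if_true, reduceIte]
        exact ih paras []
      · have hc' : List.map String.toList cur ≠ [] := by simpa using hc
        rw [if_neg hc', stepB_blank_flush _ _ hl (by simpa using hc)]
        rw [ih (paras ++ [PySem.Str.join "\n" cur]) []]
        simp [List.append_assoc, PySem.Str.toList_join]
    · have hl' : PySem.Chars.strip line.toList ≠ [] :=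
        fun hcc => hl ((strip_toList_nil_iff line).mpr hcc)
      rw [stepB_ne _ _ hl, colB_cons_ne _ _ _ hl']
      rw [ih paras (cur ++ [PySem.Str.strip line])]
      simp [PySem.Str.toList_strip]

theorem main_chain (ss : List (List Char)) (h : ∀ s ∈ ss, PySem.Chars.strip s = s) :
    PySem.Chars.strip (PySem.Chars.join ['\n'] (colA false ss)) =
      PySem.Chars.join ['\n', '\n'] (colB [] ss) := by
  rw [strip_eq, lstrip_join _ (colA_stripped false ss h), dropWhile_colA false ss,
    rstrip_join _ (colA_stripped true ss h)]
  exact ((KK ss.length).2 ss le_rfl).symm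

-- ===== VERDICT (by name: the statement is the Claim_ definition above) =====
theorem finalize_rendered_text_py_spec : Claim_equal_finalize_rendered_text_py := by
  intro text _
  unfold Spec_finalize_rendered_text_py
  have hmapnl : ("\n" : String).toList = ['\n'] := by decide
  have hmapnl2 : ("\n\n" : String).toList = ['\n', '\n'] := by decide
  have hcomp :
      ((PySem.Str.splitlines text).map PySem.Str.rstrip).map
          (fun l => PySem.Chars.strip l.toList) =
        (PySem.Str.splitlines text).map (fun l => PySem.Chars.strip l.toList) := by
    rw [List.map_map]
    refine List.map_congr_left ?_
    intro l _
    simp only [Function.comp_apply, PySem.Str.toList_rstrip]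
    exact strip_rstrip l.toList
  have hstripped : ∀ s ∈ (PySem.Str.splitlines text).map
      (fun l => PySem.Chars.strip l.toList), PySem.Chars.strip s = s := by
    intro s hs
    obtain ⟨l, _, rfl⟩ := List.mem_map.mp hs
    exact strip_idem l.toList
  have hA : (finalize_rendered_text_py text).toList =
      PySem.Chars.strip (PySem.Chars.join ['\n']
        (colA false ((PySem.Str.splitlines text).map (fun l => PySem.Chars.strip l.toList)))) := by
    simp only [finalize_rendered_text_py]
    rw [PySem.Str.toList_strip, PySem.Str.toList_join, hmapnl,
      foldA_bridge ((PySem.Str.splitlines text).map PySem.Str.rstrip) [] false, hcomp]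
    simp
  have hB : (finalize_rendered_text_py_alt text).toList =
      PySem.Chars.join ['\n', '\n']
        (colB [] ((PySem.Str.splitlines text).map (fun l => PySem.Chars.strip l.toList))) := by
    have hb := foldB_bridge (PySem.Str.splitlines text) [] []
    simp only [flushStr, List.map_nil, List.nil_append] at hb
    simp only [finalize_rendered_text_py_alt]
    rw [PySem.Str.toList_join, hmapnl2, hb]
  have hlists : (finalize_rendered_text_py text).toList =
      (finalize_rendered_text_py_alt text).toList := by
    rw [hA, hB, main_chain _ hstripped]
  have := congrArg String.ofList hlists
  simpa using this
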